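-- pv_equiv track=rewrite | github.com/fengjianjiang41/HUAWEI-Dev-Position-Prep | HJ55 挑7.py | getCountOfSeven
-- ===== SOURCE A (Python) =====
-- N=30000
--
-- M=len(str(N))-2
--
-- def getCountOfSeven(n):
--     sevenList=[]
--     # 7的倍数
--     for i in range(7,n+1,7):
--         sevenList.append(i)
--     # 个位是7
--     for i in range(7,n+1,10):
--         sevenList.append(i)
--     # 十位是7、百位是7、千位是7……
--     for a in [10**i for i in range(M)]:
--         for flag in [(80+100*j)*a for j in range(N//(100*a))]:
--             tmp=n+1 if n<flag else flag
--             for i in range(flag-10*a,tmp):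
--                 sevenList.append(i)
--     sevenList=list(set(sevenList))
--     return len(sevenList)
-- ===== SOURCE B (Python) =====
-- def _has_seven(m):
--     while m:
--         if m % 10 == 7:
--             return True
--         m //= 10
--     return False
--
-- def getCountOfSeven(n):
--     count = 0
--     for m in range(1, n + 1):
--         if m % 7 == 0 or _has_seven(m):
--             count += 1
--     return count
-- ===== Notes on version B (the rewrite author's own statement) =====
-- stated objective: simpler
-- what changed: B replaces A's three generate-append digit tables plus set deduplication by one direct counting pass that tests each number for divisibility by 7 or a digit 7; Pre_ restricts to n <= 30000, the problem bound baked into A as the module constant N, beyond which A's tables stop covering further digit positions while B keeps testing every digit.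
-- outside the precondition, e.g. on getCountOfSeven(30070): A returns 13144, B returns 13145
import Mathlib
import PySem

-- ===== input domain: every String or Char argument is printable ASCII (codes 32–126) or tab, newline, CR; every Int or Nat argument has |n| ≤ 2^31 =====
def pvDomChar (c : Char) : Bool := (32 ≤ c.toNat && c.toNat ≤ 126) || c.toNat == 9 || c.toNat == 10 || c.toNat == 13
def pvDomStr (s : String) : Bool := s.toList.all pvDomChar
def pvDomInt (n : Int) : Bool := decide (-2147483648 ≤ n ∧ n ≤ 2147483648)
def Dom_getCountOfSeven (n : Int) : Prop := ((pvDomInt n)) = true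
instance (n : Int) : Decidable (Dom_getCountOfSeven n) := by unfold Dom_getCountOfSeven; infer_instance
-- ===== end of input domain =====

-- B replaces A's generate-append-deduplicate table construction by one direct counting pass
-- (simpler, not faster); proved equal on the problem bound n ≤ 30000 stated in Pre_.

-- ===== PORT A =====
-- module constants: N = 30000, M = len(str(N)) - 2
def pvNconst : Int := 30000
def pvMconst : Int := PySem.Str.len (PySem.Int.toStr pvNconst) - 2

def getCountOfSeven (n : Int) : Int :=
  let sevenList : List Int := []
  -- for i in range(7, n+1, 7): sevenList.append(i)
  let sevenList := (PySem.List.pyRange 7 (n + 1) 7).foldl (fun acc i => acc ++ [i]) sevenList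
  -- for i in range(7, n+1, 10): sevenList.append(i)
  let sevenList := (PySem.List.pyRange 7 (n + 1) 10).foldl (fun acc i => acc ++ [i]) sevenList
  -- for a in [10**i for i in range(M)]: for flag in [(80+100*j)*a for j in range(N//(100*a))]: …
  -- (10**i ported as (10:Int)^i.toNat — exact here since range(M) yields only i ≥ 0)
  let sevenList := ((PySem.List.pyRange 0 pvMconst 1).map (fun i => (10 : Int) ^ i.toNat)).foldl
      (fun acc a =>
        ((PySem.List.pyRange 0 (PySem.Int.floordiv pvNconst (100 * a)) 1).map
            (fun j => (80 + 100 * j) * a)).foldl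
          (fun acc flag =>
            let tmp := if n < flag then n + 1 else flag
            (PySem.List.pyRange (flag - 10 * a) tmp 1).foldl (fun acc i => acc ++ [i]) acc)
          acc)
      sevenList
  -- sevenList = list(set(sevenList)); return len(sevenList)  (only the length is used)
  ((PySem.Set.ofList sevenList).length : Int)

-- ===== PORT B =====
-- _has_seven(m): while m: if m % 10 == 7: return True; m //= 10; return False
-- (B only calls it with m ≥ 1, where the Python loop terminates; the m ≤ 0 guard
--  makes the Lean recursion total and is unreachable from getCountOfSeven_alt)
def pvHasSeven (m : Int) : Bool :=
  if _h : m ≤ 0 then false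
  else if PySem.Int.mod m 10 == 7 then true
  else pvHasSeven (PySem.Int.floordiv m 10)
termination_by m.toNat
decreasing_by
  rw [PySem.Int.floordiv_eq_ediv_of_pos (by norm_num)]
  omega

def getCountOfSeven_alt (n : Int) : Int :=
  (PySem.List.pyRange 1 (n + 1) 1).foldl
    (fun count m =>
      if PySem.Int.mod m 7 == 0 || pvHasSeven m then count + 1 else count) 0

-- ===== PRECONDITION & SPEC =====
-- Pre_ excludes n > 30000: the problem's input bound is baked into A as the module constant
-- N = 30000 from which its digit tables are generated, so above it A's tables cover no further
-- digit positions while B keeps testing every digit of every number.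
def Pre_getCountOfSeven (n : Int) : Prop := n ≤ 30000
instance (n : Int) : Decidable (Pre_getCountOfSeven n) := by unfold Pre_getCountOfSeven; infer_instance
def pvWitness_getCountOfSeven : Int := 100

def Spec_getCountOfSeven (n : Int) (out : Int) : Prop := out = getCountOfSeven_alt n
instance (n : Int) (out : Int) : Decidable (Spec_getCountOfSeven n out) := by unfold Spec_getCountOfSeven; infer_instance

-- ===== CLAIM =====
def Claim_equal_getCountOfSeven : Prop := ∀ (n : Int), Dom_getCountOfSeven n → Pre_getCountOfSeven n → Spec_getCountOfSeven n (getCountOfSeven n)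

-- ===== LEMMAS AND PROOFS =====

-- the predicate characterising membership in A's deduplicated list (for 1 ≤ m ≤ n)
def pvT (m : Int) : Bool :=
  decide ((7 ≤ m ∧ m % 7 = 0) ∨ (7 ≤ m ∧ m % 10 = 7) ∨
    (0 ≤ m ∧ m < 30000 ∧
      ((70 ≤ m % 100 ∧ m % 100 < 80) ∨ (700 ≤ m % 1000 ∧ m % 1000 < 800) ∨
       (7000 ≤ m % 10000 ∧ m % 10000 < 8000))))

lemma pvMap_eq :
    ((PySem.List.pyRange 0 pvMconst 1).map (fun i => (10 : Int) ^ i.toNat)) = [1, 10, 100] := by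
  decide

lemma count_ofList {L R : List Int} (p : Int → Bool) (hR : R.Nodup)
    (h : ∀ x, x ∈ L ↔ (x ∈ R ∧ p x = true)) :
    (PySem.Set.ofList L).length = (R.filter p).length := by
  have n1 := PySem.Set.nodup_ofList (α := Int) L
  have n2 : (R.filter p).Nodup := hR.filter p
  have hfs : (PySem.Set.ofList L).toFinset = (R.filter p).toFinset := by
    ext x
    simp [PySem.Set.mem_ofList, h x]
  rw [← List.toFinset_card_of_nodup n1, ← List.toFinset_card_of_nodup n2, hfs]

lemma A_eq (n : Int) :
    getCountOfSeven n = (((PySem.List.pyRange 1 (n + 1) 1).filter pvT).length : Int) := by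
  unfold getCountOfSeven
  rw [pvMap_eq]
  simp only [List.foldl_cons, List.foldl_nil, PySem.List.foldl_append_singleton_eq_self]
  simp only [PySem.List.foldl_append_eq_flatMap]
  rw [count_ofList pvT (PySem.List.nodup_pyRange_one 1 (n+1))]
  intro x
  have e1 : PySem.Int.floordiv pvNconst (100 * 1) = 300 := by decide
  have e2 : PySem.Int.floordiv pvNconst (100 * 10) = 30 := by decide
  have e3 : PySem.Int.floordiv pvNconst (100 * 100) = 3 := by decide
  rw [e1, e2, e3]
  simp only [List.nil_append, List.mem_append, List.mem_flatMap, List.mem_map,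
    PySem.List.mem_pyRange_iff_of_pos (show (0:Int) < 7 by norm_num),
    PySem.List.mem_pyRange_iff_of_pos (show (0:Int) < 10 by norm_num),
    PySem.List.mem_pyRange_one, exists_exists_and_eq_and, pvT, decide_eq_true_eq]
  constructor
  · rintro ((((⟨h1,h2,h3⟩ | ⟨h1,h2,h3⟩) | ⟨j,⟨hj0,hj1⟩,h2,hx⟩) | ⟨j,⟨hj0,hj1⟩,h2,hx⟩) | ⟨j,⟨hj0,hj1⟩,h2,hx⟩)
    · exact ⟨by omega, by omega⟩
    · exact ⟨by omega, by omega⟩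
    · split_ifs at hx <;> exact ⟨by omega, by omega⟩
    · split_ifs at hx <;> exact ⟨by omega, by omega⟩
    · split_ifs at hx <;> exact ⟨by omega, by omega⟩
  · rintro ⟨⟨hx1, hx2⟩, (⟨h1,h2⟩ | ⟨h1,h2⟩ | ⟨h0,h30,(hd | hd | hd)⟩)⟩
    · exact Or.inl (Or.inl (Or.inl (Or.inl ⟨by omega, by omega, by omega⟩)))
    · exact Or.inl (Or.inl (Or.inl (Or.inr ⟨by omega, by omega, by omega⟩)))
    · refine Or.inl (Or.inl (Or.inr ⟨x/100, ⟨by omega, by omega⟩, by omega, ?_⟩))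
      split_ifs <;> omega
    · refine Or.inl (Or.inr ⟨x/1000, ⟨by omega, by omega⟩, by omega, ?_⟩)
      split_ifs <;> omega
    · refine Or.inr ⟨x/10000, ⟨by omega, by omega⟩, by omega, ?_⟩
      split_ifs <;> omega

-- unfolding lemmas for the digit-scanning helper
lemma pvHasSeven_nonpos {m : Int} (h : m ≤ 0) : pvHasSeven m = false := by
  rw [pvHasSeven]; simp [h]

lemma pvHasSeven_step' (m : Int) (h : 0 ≤ m) :
    pvHasSeven m = ((decide (m % 10 = 7) && decide (m ≠ 0)) || pvHasSeven (m / 10)) := by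
  rcases eq_or_lt_of_le h with rfl | hpos
  · simp [pvHasSeven_nonpos (le_refl (0 : Int))]
  · rw [pvHasSeven]
    rw [dif_neg (by omega), PySem.Int.floordiv_eq_ediv_of_pos (by norm_num),
      PySem.Int.mod_eq_emod_of_pos (by norm_num)]
    rcases eq_or_ne (m % 10) 7 with he | he <;> simp [he, show m ≠ 0 by omega]

-- on 1 ≤ m ≤ 30000 the digit scan sees exactly the four low digits plus a leading digit ≤ 3
lemma pvHasSeven_eq_pvT {m : Int} (h1 : 1 ≤ m) (h2 : m ≤ 30000) :
    (PySem.Int.mod m 7 == 0 || pvHasSeven m) = pvT m := by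
  have c2 : m / 10 / 10 = m / 100 := by omega
  have c3 : m / 100 / 10 = m / 1000 := by omega
  have c4 : m / 1000 / 10 = m / 10000 := by omega
  have q5 : m / 10000 / 10 ≤ 0 := by omega
  rw [pvHasSeven_step' m (by omega), pvHasSeven_step' _ (by omega : (0:Int) ≤ m / 10)]
  rw [c2, pvHasSeven_step' _ (by omega : (0:Int) ≤ m / 100)]
  rw [c3, pvHasSeven_step' _ (by omega : (0:Int) ≤ m / 1000)]
  rw [c4, pvHasSeven_step' _ (by omega : (0:Int) ≤ m / 10000)]
  rw [pvHasSeven_nonpos q5, PySem.Int.mod_eq_emod_of_pos (show (0:Int) < 7 by norm_num)]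
  have t1 : m / 10 % 10 = 7 ↔ (70 ≤ m % 100 ∧ m % 100 < 80) := by omega
  have t2 : m / 100 % 10 = 7 ↔ (700 ≤ m % 1000 ∧ m % 1000 < 800) := by omega
  have t3 : m / 1000 % 10 = 7 ↔ (7000 ≤ m % 10000 ∧ m % 10000 < 8000) := by omega
  have t4 : ¬ m / 10000 % 10 = 7 := by omega
  rw [Bool.eq_iff_iff]
  simp only [pvT, Bool.or_eq_true, Bool.and_eq_true, beq_iff_eq, decide_eq_true_eq,
    Bool.false_eq_true, or_false, ne_eq]
  constructor
  · rintro (h | ⟨h, -⟩ | ⟨h, -⟩ | ⟨h, -⟩ | ⟨h, -⟩ | ⟨h, -⟩)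
    · exact Or.inl ⟨by omega, h⟩
    · exact Or.inr (Or.inl ⟨by omega, h⟩)
    · exact Or.inr (Or.inr ⟨by omega, by omega, Or.inl (t1.mp h)⟩)
    · exact Or.inr (Or.inr ⟨by omega, by omega, Or.inr (Or.inl (t2.mp h))⟩)
    · exact Or.inr (Or.inr ⟨by omega, by omega, Or.inr (Or.inr (t3.mp h))⟩)
    · exact absurd h t4
  · rintro (⟨-, h⟩ | ⟨-, h⟩ | ⟨-, -, (h | h | h)⟩)
    · exact Or.inl h
    · exact Or.inr (Or.inl ⟨h, by omega⟩)
    · exact Or.inr (Or.inr (Or.inl ⟨t1.mpr h, by omega⟩))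
    · exact Or.inr (Or.inr (Or.inr (Or.inl ⟨t2.mpr h, by omega⟩)))
    · exact Or.inr (Or.inr (Or.inr (Or.inr (Or.inl ⟨t3.mpr h, by omega⟩))))

-- ===== VERDICT (by name: the statement is the Claim_ definition above) =====
theorem getCountOfSeven_spec : Claim_equal_getCountOfSeven := by
  intro n _ hpre
  have hn : n ≤ 30000 := hpre
  unfold Spec_getCountOfSeven getCountOfSeven_alt
  rw [show (fun (count m : Int) =>
      if PySem.Int.mod m 7 == 0 || pvHasSeven m then count + 1 else count)
      = (fun count m => if (PySem.Int.mod m 7 == 0 || pvHasSeven m) = true then count + 1 else count) by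
    funext count m; split_ifs <;> simp_all]
  rw [PySem.List.foldl_if_add_one, A_eq, List.countP_eq_length_filter]
  have hfeq : (PySem.List.pyRange 1 (n+1) 1).filter pvT
      = (PySem.List.pyRange 1 (n+1) 1).filter (fun m => PySem.Int.mod m 7 == 0 || pvHasSeven m) := by
    apply List.filter_congr
    intro x hx
    rw [PySem.List.mem_pyRange_one] at hx
    exact (pvHasSeven_eq_pvT (by omega) (by omega : x ≤ 30000)).symm
  rw [hfeq]
  omega
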